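-- pv_equiv track=rewrite | github.com/GusSand/CoT_Exploration | data/personal_relations/generate_data.py | generate_cot
-- ===== SOURCE A (Python) =====
-- from typing import List, Dict, Tuple, Set
--
-- def generate_cot(starting_person: str,
--                  relations: List[str],
--                  universe: Dict[Tuple[str, str], str]) -> Tuple[List[str], str]:
--     """
--     Generate step-by-step Chain-of-Thought reasoning.
--
--     Returns:
--         (cot_steps, final_answer)
--     """
--     steps = []
--     current_person = starting_person
--
--     for i, relation in enumerate(relations, 1):
--         key = (current_person, relation)
--         if key not in universe:
--             # Invalid path - this question can't be answered
--             return None, None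
--
--         next_person = universe[key]
--         path = "'s ".join(relations[:i])
--         step = f"{starting_person}'s {path} = {next_person}"
--         steps.append(step)
--         current_person = next_person
--
--     return steps, current_person
-- ===== SOURCE B (Python) =====
-- def generate_cot(starting_person, relations, universe):
--     # Recursive descent: the path string is accumulated incrementally
--     # (path + "'s " + relation), never re-joined from a prefix, and the
--     # step list is constructed back-to-front as the recursion unwinds.
--     def walk(cur, path, rels):
--         if not rels:
--             return [], cur
--         rel, rest = rels[0], rels[1:]
--         nxt = universe.get((cur, rel))
--         if nxt is None:
--             return None
--         new_path = rel if path is None else path + "'s " + rel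
--         res = walk(nxt, new_path, rest)
--         if res is None:
--             return None
--         steps, final = res
--         return [f"{starting_person}'s {new_path} = {nxt}"] + steps, final
--     res = walk(starting_person, None, relations)
--     return (None, None) if res is None else res
-- ===== Notes on version B (the rewrite author's own statement) =====
-- stated objective: alternative
-- what changed: B is a recursive descent that threads the path string incrementally (path + "'s " + relation) instead of re-joining relations[:i] at every step, builds the step list back-to-front as the recursion unwinds (cons, no append to a mutable accumulator), and signals an invalid path by a None result bubbling up the recursion rather than an early return from a loop.
import Mathlib
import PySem

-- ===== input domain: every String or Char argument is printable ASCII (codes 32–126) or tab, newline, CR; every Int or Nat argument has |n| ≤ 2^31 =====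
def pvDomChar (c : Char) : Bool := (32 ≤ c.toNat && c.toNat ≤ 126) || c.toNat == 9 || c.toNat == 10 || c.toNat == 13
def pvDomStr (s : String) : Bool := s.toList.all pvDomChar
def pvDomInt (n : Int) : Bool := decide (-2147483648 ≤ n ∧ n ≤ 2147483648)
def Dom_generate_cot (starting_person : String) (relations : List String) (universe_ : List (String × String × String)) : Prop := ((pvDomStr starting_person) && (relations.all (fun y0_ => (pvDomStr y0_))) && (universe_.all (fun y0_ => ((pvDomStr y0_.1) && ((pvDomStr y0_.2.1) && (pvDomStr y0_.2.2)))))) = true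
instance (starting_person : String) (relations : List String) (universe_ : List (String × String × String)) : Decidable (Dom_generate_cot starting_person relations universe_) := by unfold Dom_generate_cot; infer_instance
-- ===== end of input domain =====

-- B replaces A's loop-with-prefix-join by a recursive descent with an incremental path accumulator, consing the steps on the way back (objective: alternative, same cost).


-- ===== PORT A =====
-- dict primitive: first-match lookup of key (cur, rel) in the association list (exact for a Python dict)
def lookupU (universe_ : List (String × String × String)) (cur rel : String) : Option String :=
  match universe_ with
  | [] => none
  | (a, b, v) :: rest => if a = cur ∧ b = rel then some v else lookupU rest cur rel

-- A's single loop: enumerate(relations, 1), carrying current_person and the steps built so far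
def goA (sp : String) (universe_ : List (String × String × String)) (allrels : List String) :
    List String → Nat → String → List String → Option (List String) × Option String
  | [], _, cur, steps => (some steps, some cur)
  | r :: rs, i, cur, steps =>
      match lookupU universe_ cur r with
      | none => (none, none)
      | some nxt =>
          let path := PySem.Str.join "'s " (allrels.take i)
          goA sp universe_ allrels rs (i + 1) nxt (steps ++ [sp ++ "'s " ++ path ++ " = " ++ nxt])

def generate_cot (starting_person : String) (relations : List String) (universe_ : List (String × String × String)) : Option (List String) × Option String :=
  goA starting_person universe_ relations relations 1 starting_person []

-- ===== PORT B =====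
-- B's recursive walk: path accumulated incrementally (none = no relation consumed yet);
-- returns none on a missing key, else the steps (consed on the way back) and the final person.
def walkB (sp : String) (universe_ : List (String × String × String)) :
    String → Option String → List String → Option (List String × String)
  | cur, _, [] => some ([], cur)
  | cur, path, r :: rest =>
      match lookupU universe_ cur r with
      | none => none
      | some nxt =>
          let new_path := match path with
            | none => r
            | some p => p ++ "'s " ++ r
          match walkB sp universe_ nxt (some new_path) rest with
          | none => none
          | some (steps, final) =>
              some ((sp ++ "'s " ++ new_path ++ " = " ++ nxt) :: steps, final)

def generate_cot_alt (starting_person : String) (relations : List String) (universe_ : List (String × String × String)) : Option (List String) × Option String :=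
  match walkB starting_person universe_ starting_person none relations with
  | none => (none, none)
  | some (steps, final) => (some steps, some final)

-- ===== PRECONDITION & SPEC =====
def Spec_generate_cot (starting_person : String) (relations : List String) (universe_ : List (String × String × String)) (out : Option (List String) × Option String) : Prop := out = generate_cot_alt starting_person relations universe_
instance (starting_person : String) (relations : List String) (universe_ : List (String × String × String)) (out : Option (List String) × Option String) : Decidable (Spec_generate_cot starting_person relations universe_ out) := by unfold Spec_generate_cot; infer_instance

-- ===== CLAIM =====
def Claim_equal_generate_cot : Prop := ∀ (starting_person : String) (relations : List String) (universe_ : List (String × String × String)), Dom_generate_cot starting_person relations universe_ → Spec_generate_cot starting_person relations universe_ (generate_cot starting_person relations universe_)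

-- ===== LEMMAS AND PROOFS =====
-- the optional path carried by B, as a function of the consumed prefix
def optJoin (pre : List String) : Option String :=
  match pre with
  | [] => none
  | _ => some (PySem.Str.join "'s " pre)

-- snoc law for Chars.join, by induction on the list of pieces
theorem chars_join_snoc (s : List Char) (xs : List (List Char)) (r : List Char) :
    PySem.Chars.join s (xs ++ [r]) =
      match xs with
      | [] => r
      | _ => PySem.Chars.join s xs ++ s ++ r := by
  induction xs with
  | nil => simp [PySem.Chars.join_singleton]
  | cons a xs ih =>
      cases xs with
      | nil => simp [PySem.Chars.join_cons_cons, PySem.Chars.join_singleton]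
      | cons b ys =>
          have h1 : (a :: b :: ys) ++ [r] = a :: b :: (ys ++ [r]) := by simp
          rw [h1, PySem.Chars.join_cons_cons]
          have h2 : b :: (ys ++ [r]) = (b :: ys) ++ [r] := by simp
          rw [h2, ih]
          simp [PySem.Chars.join_cons_cons, List.append_assoc]

-- A's "'s ".join(relations[:i]) grows by one relation exactly as B's incremental path does
theorem join_append_one (pre : List String) (r : String) :
    PySem.Str.join "'s " (pre ++ [r]) =
      match optJoin pre with
      | none => r
      | some p => p ++ "'s " ++ r := by
  apply String.toList_inj.mp
  cases pre with
  | nil => simp [optJoin, PySem.Str.toList_join, PySem.Chars.join_singleton]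
  | cons a ps =>
      simp only [optJoin, PySem.Str.toList_join, List.map_append, List.map_cons,
        List.cons_append]
      rw [show a.toList :: (ps.map String.toList ++ r.toList :: List.map String.toList [])
            = (a.toList :: ps.map String.toList) ++ [r.toList] by simp]
      rw [chars_join_snoc]
      simp [String.toList_append, PySem.Str.toList_join]

theorem goA_eq_walkB (sp : String) (u : List (String × String × String)) :
    ∀ (rs pre : List String) (cur : String) (steps : List String),
      goA sp u (pre ++ rs) rs (pre.length + 1) cur steps =
        match walkB sp u cur (optJoin pre) rs with
        | none => (none, none)
        | some (st, final) => (some (steps ++ st), some final) := by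
  intro rs
  induction rs with
  | nil => intro pre cur steps; simp [goA, walkB]
  | cons r rest ih =>
      intro pre cur steps
      simp only [goA, walkB]
      cases h : lookupU u cur r with
      | none => simp
      | some nxt =>
          dsimp only
          have htake : (pre ++ r :: rest).take (pre.length + 1) = pre ++ [r] := by
            simp [List.take_append]
          rw [htake, join_append_one]
          have hre : pre ++ r :: rest = (pre ++ [r]) ++ rest := by simp
          have hlen : pre.length + 1 + 1 = (pre ++ [r]).length + 1 := by simp
          have hop : optJoin (pre ++ [r]) = some (PySem.Str.join "'s " (pre ++ [r])) := by
            cases pre <;> simp [optJoin]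
          rw [hre, hlen, ih (pre ++ [r]) nxt]
          rw [hop, join_append_one]
          cases walkB sp u nxt (some (match optJoin pre with | none => r | some p => p ++ "'s " ++ r)) rest with
          | none => simp
          | some p => cases p; simp

-- ===== VERDICT =====
theorem generate_cot_spec : Claim_equal_generate_cot := by
  intro sp rels u _
  unfold Spec_generate_cot generate_cot generate_cot_alt
  have := goA_eq_walkB sp u rels [] sp []
  simp only [List.nil_append, List.length_nil, optJoin] at this
  rw [this]
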